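-- pv_equiv track=rewrite | github.com/harish-3105/MedIntel | backend/api/symptom_checker.py | _is_emergency_condition
-- ===== SOURCE A (Python) =====
-- def _is_emergency_condition(condition: str) -> bool:
--     """Check if a medical condition is an emergency"""
--     condition_lower = condition.lower()
--     emergency_terms = [
--         "heart attack",
--         "stroke",
--         "myocardial infarction",
--         "cardiac arrest",
--         "anaphylaxis",
--         "severe allergic reaction",
--         "meningitis",
--         "sepsis",
--         "pulmonary embolism",
--         "aortic dissection",
--         "ectopic pregnancy",
--         "acute abdomen",
--         "appendicitis",
--         "peritonitis",
--         "pancreatitis",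
--         "diabetic ketoacidosis",
--         "severe hypoglycemia",
--         "respiratory failure",
--         "pneumothorax",
--         "hemothorax",
--         "intracranial hemorrhage",
--         "subarachnoid hemorrhage",
--         "acute coronary syndrome",
--         "venomous",
--         "envenomation",
--         "snake bite",
--         "poisoning",
--         "overdose",
--         "severe bleeding",
--         "hemorrhage",
--         "trauma",
--         "fracture",
--     ]
--     return any(term in condition_lower for term in emergency_terms)
-- ===== SOURCE B (Python) =====
-- # First-character index: scan the string once, and at each position test only the
-- # few terms whose first letter matches, via a dict keyed on that letter.
-- _EMERGENCY_INDEX = {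
--     "h": ["eart attack", "emothorax", "emorrhage"],
--     "s": ["troke", "evere allergic reaction", "epsis", "evere hypoglycemia",
--           "ubarachnoid hemorrhage", "nake bite", "evere bleeding"],
--     "m": ["yocardial infarction", "eningitis"],
--     "c": ["ardiac arrest"],
--     "a": ["naphylaxis", "ortic dissection", "cute abdomen", "ppendicitis",
--           "cute coronary syndrome"],
--     "p": ["ulmonary embolism", "eritonitis", "ancreatitis", "neumothorax", "oisoning"],
--     "e": ["ctopic pregnancy", "nvenomation"],
--     "d": ["iabetic ketoacidosis"],
--     "r": ["espiratory failure"],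
--     "i": ["ntracranial hemorrhage"],
--     "v": ["enomous"],
--     "o": ["verdose"],
--     "t": ["rauma"],
--     "f": ["racture"],
-- }
--
-- def _is_emergency_condition(condition: str) -> bool:
--     """Check if a medical condition is an emergency"""
--     s = condition.lower()
--     for i, ch in enumerate(s):
--         for tail in _EMERGENCY_INDEX.get(ch, ()):
--             if s.startswith(tail, i + 1):
--                 return True
--     return False
-- ===== Notes on version B (the rewrite author's own statement) =====
-- stated objective: alternative
-- what changed: Replaces A's per-term any(term in s) loop over 32 full substring searches with one left-to-right scan of the lowercased string using a dict indexed by first character, so each position only tests the few term tails whose first letter matches.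
import Mathlib
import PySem

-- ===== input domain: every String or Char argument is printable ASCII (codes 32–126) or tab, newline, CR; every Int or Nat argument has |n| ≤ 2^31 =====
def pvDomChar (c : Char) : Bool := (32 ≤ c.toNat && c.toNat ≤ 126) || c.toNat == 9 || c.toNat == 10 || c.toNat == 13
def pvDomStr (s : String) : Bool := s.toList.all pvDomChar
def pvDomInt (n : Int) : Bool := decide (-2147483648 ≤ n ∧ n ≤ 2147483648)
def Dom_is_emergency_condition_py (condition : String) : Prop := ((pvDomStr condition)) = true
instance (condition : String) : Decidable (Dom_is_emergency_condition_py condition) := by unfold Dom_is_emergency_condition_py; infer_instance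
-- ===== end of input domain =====

-- B replaces A's per-term any(...) substring loop with a single left-to-right scan over the
-- lowercased string, testing at each position only the terms indexed under that position's
-- first character (objective: alternative single-pass index scan); same return value.


-- ===== PORT A =====
def pvEmergencyTerms : List String :=
  ["heart attack", "stroke", "myocardial infarction", "cardiac arrest",
   "anaphylaxis", "severe allergic reaction", "meningitis", "sepsis",
   "pulmonary embolism", "aortic dissection", "ectopic pregnancy",
   "acute abdomen", "appendicitis", "peritonitis", "pancreatitis",
   "diabetic ketoacidosis", "severe hypoglycemia", "respiratory failure",
   "pneumothorax", "hemothorax", "intracranial hemorrhage",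
   "subarachnoid hemorrhage", "acute coronary syndrome", "venomous",
   "envenomation", "snake bite", "poisoning", "overdose",
   "severe bleeding", "hemorrhage", "trauma", "fracture"]

-- A: any(term in condition_lower for term in emergency_terms)
def is_emergency_condition_py (condition : String) : Bool :=
  let condition_lower := PySem.Str.lower condition
  pvEmergencyTerms.any (fun term => PySem.Str.isIn term condition_lower)

-- ===== PORT B =====
-- the dict _EMERGENCY_INDEX: first character ↦ tails of the terms starting with it
def pvEmergencyIndex : List (Char × List String) :=
  [('h', ["eart attack", "emothorax", "emorrhage"]),
   ('s', ["troke", "evere allergic reaction", "epsis", "evere hypoglycemia", "ubarachnoid hemorrhage", "nake bite", "evere bleeding"]),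
   ('m', ["yocardial infarction", "eningitis"]),
   ('c', ["ardiac arrest"]),
   ('a', ["naphylaxis", "ortic dissection", "cute abdomen", "ppendicitis", "cute coronary syndrome"]),
   ('p', ["ulmonary embolism", "eritonitis", "ancreatitis", "neumothorax", "oisoning"]),
   ('e', ["ctopic pregnancy", "nvenomation"]),
   ('d', ["iabetic ketoacidosis"]),
   ('r', ["espiratory failure"]),
   ('i', ["ntracranial hemorrhage"]),
   ('v', ["enomous"]),
   ('o', ["verdose"]),
   ('t', ["rauma"]),
   ('f', ["racture"])]

-- _EMERGENCY_INDEX.get(ch, ())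
def pvLookup (c : Char) : List String :=
  match pvEmergencyIndex.find? (fun p => p.1 == c) with
  | some p => p.2
  | none => []

-- the for-loop over enumerate(s): at each position test the tails indexed under s[i]
-- (s.startswith(tail, i+1) = tail.isPrefixOf of the remaining characters)
def pvScan : List Char → Bool
  | [] => false
  | c :: rest => (pvLookup c).any (fun t => t.toList.isPrefixOf rest) || pvScan rest

def is_emergency_condition_py_alt (condition : String) : Bool :=
  pvScan (PySem.Chars.lower condition.toList)

-- ===== PRECONDITION & SPEC =====
def Spec_is_emergency_condition_py (condition : String) (out : Bool) : Prop := out = is_emergency_condition_py_alt condition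
instance (condition : String) (out : Bool) : Decidable (Spec_is_emergency_condition_py condition out) := by unfold Spec_is_emergency_condition_py; infer_instance

-- ===== CLAIM =====
def Claim_equal_is_emergency_condition_py : Prop := ∀ (condition : String), Dom_is_emergency_condition_py condition → Spec_is_emergency_condition_py condition (is_emergency_condition_py condition)

-- ===== LEMMAS AND PROOFS =====

-- the index, flattened back to a list of full terms (as char lists)
def pvFlat : List (List Char) :=
  pvEmergencyIndex.flatMap (fun p => p.2.map (fun t => p.1 :: t.toList))

-- the flattened index holds exactly A's terms (up to order)
theorem pvFlat_perm : pvFlat.Perm (pvEmergencyTerms.map String.toList) := by decide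

-- generic: in an assoc list with nodup keys, find? on a key of a member returns that member
theorem pvFind_assoc {β : Type} (l : List (Char × β))
    (hn : (l.map Prod.fst).Nodup) (p : Char × β) (hp : p ∈ l) :
    l.find? (fun q => q.1 == p.1) = some p := by
  induction l with
  | nil => cases hp
  | cons q l ih =>
    simp only [List.map_cons, List.nodup_cons, List.mem_map] at hn
    rcases List.mem_cons.mp hp with rfl | hp'
    · simp [List.find?]
    · have hne : ¬ (q.1 == p.1) = true := by
        simp only [beq_iff_eq]
        intro h
        exact hn.1 ⟨p, hp', h.symm⟩
      simp [List.find?, hne, ih hn.2 hp']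

-- the inner dict-lookup loop finds a tail iff some flattened term is a prefix of c :: rest
theorem pvLookup_any_iff (c : Char) (rest : List Char) :
    ((pvLookup c).any (fun t => t.toList.isPrefixOf rest) = true) ↔
      ∃ alt ∈ pvFlat, alt.isPrefixOf (c :: rest) := by
  constructor
  · intro h
    rcases List.any_eq_true.mp h with ⟨t, ht, hpre⟩
    unfold pvLookup at ht
    rcases hfind : pvEmergencyIndex.find? (fun p => p.1 == c) with _ | p
    · rw [hfind] at ht; cases ht
    · rw [hfind] at ht
      have hmem := List.mem_of_find?_eq_some hfind
      have hkey : p.1 = c := by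
        have := List.find?_some hfind
        exact beq_iff_eq.mp this
      refine ⟨p.1 :: t.toList, ?_, ?_⟩
      · exact List.mem_flatMap.mpr ⟨p, hmem, List.mem_map.mpr ⟨t, ht, rfl⟩⟩
      · simp [List.isPrefixOf, hkey, hpre]
  · rintro ⟨alt, hmem, hpre⟩
    rcases List.mem_flatMap.mp hmem with ⟨p, hp, halt⟩
    rcases List.mem_map.mp halt with ⟨t, ht, rfl⟩
    simp only [List.isPrefixOf, Bool.and_eq_true, beq_iff_eq] at hpre
    have hkey : p.1 = c := hpre.1
    have hfind : pvEmergencyIndex.find? (fun q => q.1 == c) = some p := by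
      rw [← hkey]
      exact pvFind_assoc pvEmergencyIndex (by decide) p hp
    refine List.any_eq_true.mpr ⟨t, ?_, hpre.2⟩
    unfold pvLookup
    rw [hfind]
    exact ht

-- the position scan finds a match iff some flattened term is an infix of the scanned text
theorem pvScan_iff (cs : List Char) :
    pvScan cs = true ↔ ∃ alt ∈ pvFlat, alt <:+: cs := by
  induction cs with
  | nil =>
    simp only [pvScan, Bool.false_eq_true, false_iff]
    rintro ⟨alt, hmem, hinf⟩
    have : alt = [] := List.eq_nil_of_infix_nil hinf
    subst this
    revert hmem; decide
  | cons c rest ih =>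
    simp only [pvScan, Bool.or_eq_true, pvLookup_any_iff, ih]
    constructor
    · rintro (⟨a, ha, hp⟩ | ⟨a, ha, hi⟩)
      · exact ⟨a, ha, (List.isPrefixOf_iff_prefix.mp hp).isInfix⟩
      · exact ⟨a, ha, hi.trans (List.suffix_cons c rest).isInfix⟩
    · rintro ⟨a, ha, hi⟩
      rcases List.infix_cons_iff.mp hi with hp | hi'
      · exact Or.inl ⟨a, ha, List.isPrefixOf_iff_prefix.mpr hp⟩
      · exact Or.inr ⟨a, ha, hi'⟩

-- ===== VERDICT =====
theorem is_emergency_condition_py_spec : Claim_equal_is_emergency_condition_py := by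
  intro condition _
  unfold Spec_is_emergency_condition_py is_emergency_condition_py is_emergency_condition_py_alt
  rw [Bool.eq_iff_iff]
  simp only [List.any_eq_true, PySem.Str.isIn_eq, PySem.Str.toList_lower,
    PySem.Chars.isIn_iff_infix, pvScan_iff]
  constructor
  · rintro ⟨t, ht, hi⟩
    exact ⟨t.toList, pvFlat_perm.mem_iff.mpr (List.mem_map.mpr ⟨t, ht, rfl⟩), hi⟩
  · rintro ⟨a, ha, hi⟩
    rcases List.mem_map.mp (pvFlat_perm.mem_iff.mp ha) with ⟨t, ht, rfl⟩
    exact ⟨t, ht, hi⟩
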